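-- pv_equiv track=rewrite | github.com/achiyareuven/Mongo-pandas-test-project | app/processor.py | find_rarest_word
-- ===== SOURCE A (Python) =====
-- def find_rarest_word(text:str):
--     count_word= {}
--     text_clean = text.lower().split()
--     for word in text_clean:
--         if word in count_word:
--             count_word [word] +=1
--         else:
--             count_word[word] = 1
--     min_val = min(count_word.values())
--     res = [k for k, v in count_word.items() if v == min_val]
--     return res[0]
-- ===== SOURCE B (Python) =====
-- def find_rarest_word(text: str):
--     counts = {}
--     for word in text.lower().split():
--         counts[word] = counts.get(word, 0) + 1
--     return sorted(counts, key=counts.get)[0]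
-- ===== Notes on version B (the rewrite author's own statement) =====
-- stated objective: alternative
-- what changed: Replaces the min-over-values + filter comprehension + res[0] selection with a stable sort of the distinct words by their count and taking the head (and counts via get-with-default instead of a membership branch); stability of sorted preserves the first-inserted tie-break.
import Mathlib
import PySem

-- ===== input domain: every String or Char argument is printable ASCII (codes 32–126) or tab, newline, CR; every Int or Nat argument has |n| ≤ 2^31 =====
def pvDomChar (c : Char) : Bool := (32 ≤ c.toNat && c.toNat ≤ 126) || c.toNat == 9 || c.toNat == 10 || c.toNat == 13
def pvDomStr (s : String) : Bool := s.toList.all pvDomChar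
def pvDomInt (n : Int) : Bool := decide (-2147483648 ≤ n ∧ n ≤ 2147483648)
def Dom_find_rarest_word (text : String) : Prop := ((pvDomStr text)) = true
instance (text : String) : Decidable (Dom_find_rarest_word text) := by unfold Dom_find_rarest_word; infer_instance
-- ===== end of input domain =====

-- B selects the answer by a stable sort of the distinct words by their count and taking the head,
-- instead of A's min-over-values + filter + res[0] (objective: alternative, not faster).

-- ===== PORT A =====
def find_rarest_word (text : String) : String :=
  let text_clean := PySem.Str.split₀ (PySem.Str.lower text)
  let count_word := text_clean.foldl
    (fun d word =>
      if d.contains word then d.insert word (d.getD word 0 + 1)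
      else d.insert word 1)
    (PySem.Dict.empty : PySem.Dict String Int)
  match PySem.List.min? count_word.values (fun v => v) with
  | none => ""       -- Python raises ValueError here (min of an empty sequence); excluded by Pre_
  | some min_val =>
    let res := ((count_word.items.filter (fun kv => kv.2 == min_val)).map (·.1))
    (PySem.List.pyGet? res 0).getD ""

-- ===== PORT B =====
def find_rarest_word_alt (text : String) : String :=
  let counts := (PySem.Str.split₀ (PySem.Str.lower text)).foldl
    (fun d word => d.insert word (d.getD word 0 + 1))
    (PySem.Dict.empty : PySem.Dict String Int)
  -- sorted(counts, key=counts.get)[0]; the [0] raises IndexError on empty text, excluded by Pre_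
  (PySem.List.pyGet? (PySem.List.sorted counts.keys (fun w => counts.getD w 0) false) 0).getD ""

-- ===== PRECONDITION & SPEC =====
-- Pre_ excludes exactly the inputs with no words (empty or all-whitespace text), on which
-- Python raises in both A (min of empty sequence, ValueError) and B ([0] of empty list, IndexError).
def Pre_find_rarest_word (text : String) : Prop :=
  PySem.Str.split₀ (PySem.Str.lower text) ≠ []
instance (text : String) : Decidable (Pre_find_rarest_word text) := by
  unfold Pre_find_rarest_word; infer_instance

def pvWitness_find_rarest_word : String := "a b a"

def Spec_find_rarest_word (text : String) (out : String) : Prop := out = find_rarest_word_alt text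
instance (text : String) (out : String) : Decidable (Spec_find_rarest_word text out) := by unfold Spec_find_rarest_word; infer_instance

-- ===== CLAIM (what is proved, stated in full; the proofs are below) =====
def Claim_equal_find_rarest_word : Prop := ∀ (text : String), Dom_find_rarest_word text → Pre_find_rarest_word text → Spec_find_rarest_word text (find_rarest_word text)

-- ===== LEMMAS AND PROOFS =====

theorem bodyA_eq_modify (d : PySem.Dict String Int) (w : String) :
    (if d.contains w then d.insert w (d.getD w 0 + 1) else d.insert w 1)
      = d.modify w 0 (· + 1) := by
  by_cases h : d.contains w
  · simp [h, PySem.Dict.modify]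
  · have hf : List.find? (fun p => p.1 == w) d.items = none := by
      rw [List.find?_eq_none]
      intro p hp hpw
      exact h (List.any_eq_true.2 ⟨p, hp, hpw⟩)
    have hg : d.getD w 0 = 0 := by
      simp [PySem.Dict.getD, PySem.Dict.get?, hf]
    simp [h, PySem.Dict.modify, hg]

theorem foldl_map_rel {α β σ τ : Type} (g : σ → τ) (h1 : σ → α → σ) (h2 : τ → β → τ) (f : α → β)
    (hc : ∀ s a, g (h1 s a) = h2 (g s) (f a)) :
    ∀ (l : List α) (s : σ) (t : τ), t = g s →
      List.foldl h2 t (l.map f) = g (List.foldl h1 s l) := by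
  intro l
  induction l with
  | nil => intro s t ht; simpa using ht
  | cons a l ih =>
    intro s t ht
    simp only [List.map_cons, List.foldl_cons]
    exact ih (h1 s a) _ (by rw [ht, hc])

theorem min?_map_key {α : Type} (D : List α) (f : α → Int) :
    PySem.List.min? (D.map f) (fun v => v) = (PySem.List.min? D f).map f := by
  unfold PySem.List.min?
  beta_reduce
  refine foldl_map_rel (Option.map f) _ _ f ?_ D none none rfl
  intro s a
  cases s with
  | none => rfl
  | some m => by_cases h : f a < f m <;> simp [h]

theorem foldl_min_le {α : Type} (f : α → Int) (b : Option α → α → Option α)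
    (hb : ∀ m x, b (some m) x = if f x < f m then some x else some m) (t : List α) :
    ∀ (acc m' : α), List.foldl b (some acc) t = some m' →
      f m' ≤ f acc ∧ ∀ y ∈ t, f m' ≤ f y := by
  induction t with
  | nil => intro acc m' h; simp at h; subst h; simp
  | cons x t' ih =>
    intro acc m' h
    rw [List.foldl_cons, hb] at h
    by_cases hx : f x < f acc
    · rw [if_pos hx] at h
      obtain ⟨h1, h2⟩ := ih x m' h
      refine ⟨by omega, ?_⟩
      intro y hy
      rcases List.mem_cons.1 hy with rfl | hy
      · exact h1
      · exact h2 _ hy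
    · rw [if_neg hx] at h
      obtain ⟨h1, h2⟩ := ih acc m' h
      refine ⟨h1, ?_⟩
      intro y hy
      rcases List.mem_cons.1 hy with rfl | hy
      · omega
      · exact h2 _ hy

theorem foldl_head_filter {α : Type} (f : α → Int) (b : Option α → α → Option α)
    (hb : ∀ m x, b (some m) x = if f x < f m then some x else some m) (t : List α) :
    ∀ (acc m' : α), List.foldl b (some acc) t = some m' →
      ((acc :: t).filter (fun k => f k == f m')).head? = some m' := by
  induction t with
  | nil =>
    intro acc m' h; simp at h; subst h; simp
  | cons x t' ih =>
    intro acc m' h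
    rw [List.foldl_cons, hb] at h
    by_cases hx : f x < f acc
    · rw [if_pos hx] at h
      obtain ⟨h1, _⟩ := foldl_min_le f b hb t' x m' h
      have hne : ¬ (f acc == f m') = true := by
        simp only [beq_iff_eq]; omega
      have hih := ih x m' h
      simpa [List.filter_cons, hne] using hih
    · rw [if_neg hx] at h
      obtain ⟨h1, _⟩ := foldl_min_le f b hb t' acc m' h
      have hih := ih acc m' h
      by_cases ha : f acc = f m'
      · simp only [List.filter_cons, beq_iff_eq, ha] at hih ⊢
        simp at hih ⊢
        exact hih
      · have hxne : ¬ (f x = f m') := by omega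
        simp only [List.filter_cons, beq_iff_eq] at hih ⊢
        simp [ha, hxne] at hih ⊢
        exact hih

theorem head_filter_eq_min? {α : Type} (D : List α) (f : α → Int) (m' : α)
    (h : PySem.List.min? D f = some m') :
    (D.filter (fun k => f k == f m')).head? = some m' := by
  cases D with
  | nil => simp [PySem.List.min?] at h
  | cons a t =>
    unfold PySem.List.min? at h
    rw [List.foldl_cons] at h
    exact foldl_head_filter f _ (fun m x => rfl) t a m' h

-- head of the stable sort is the FIRST key-minimal element, i.e. min?
theorem head_sorted_eq_min? {α : Type} (D : List α) (f : α → Int) :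
    (PySem.List.sorted D f false).head? = PySem.List.min? D f := by
  induction D using List.reverseRecOn with
  | nil => simp [PySem.List.sorted, PySem.List.min?]
  | append_singleton l x ih =>
    have hs : PySem.List.sorted (l ++ [x]) f false
        = PySem.List.insertBy (fun a b => decide (f a < f b)) x (PySem.List.sorted l f false) := by
      rw [PySem.List.sorted_eq_foldl_insertBy, PySem.List.sorted_eq_foldl_insertBy,
        List.foldl_append, List.foldl_cons, List.foldl_nil]
    have hm : PySem.List.min? (l ++ [x]) f
        = match PySem.List.min? l f with
          | none => some x
          | some m => if f x < f m then some x else some m := by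
      unfold PySem.List.min?
      rw [List.foldl_append, List.foldl_cons, List.foldl_nil]
      cases List.foldl _ (none : Option α) l with
      | none => rfl
      | some m => rfl
    rw [hs, hm, ← ih]
    cases hsl : PySem.List.sorted l f false with
    | nil => simp [PySem.List.insertBy]
    | cons m t =>
      simp only [PySem.List.insertBy, List.head?_cons]
      by_cases h : f x < f m <;> simp [h]

theorem main_eq (text : String) (hpre : PySem.Str.split₀ (PySem.Str.lower text) ≠ []) :
    find_rarest_word text = find_rarest_word_alt text := by
  unfold find_rarest_word find_rarest_word_alt
  dsimp only
  set words := PySem.Str.split₀ (PySem.Str.lower text) with hw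
  have hcntB : words.foldl
      (fun d word => d.insert word (d.getD word 0 + 1))
      (PySem.Dict.empty : PySem.Dict String Int) = PySem.Dict.counter words :=
    PySem.Dict.foldl_insert_getD_add_one_eq_counter words
  have hcnt : words.foldl
      (fun d word =>
        if d.contains word then d.insert word (d.getD word 0 + 1)
        else d.insert word 1)
      (PySem.Dict.empty : PySem.Dict String Int) = PySem.Dict.counter words := by
    rw [PySem.Dict.counter_eq_foldl]
    have hb : (fun (d : PySem.Dict String Int) (word : String) =>
        if d.contains word then d.insert word (d.getD word 0 + 1) else d.insert word 1)
        = (fun d x => d.modify x 0 (· + 1)) :=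
      funext fun d => funext fun w => bodyA_eq_modify d w
    rw [hb]
  rw [hcnt, hcntB]
  set f : String → Int := fun w => (words.count w : Int) with hf
  set D := PySem.List.dedup words with hD
  have hitems : (PySem.Dict.counter words).items = D.map (fun k => (k, f k)) := by
    rw [PySem.Dict.items_counter]; rfl
  have hvals : (PySem.Dict.counter words).values = D.map f := by
    simp [PySem.Dict.values, hitems, List.map_map]
  have hkeys : (PySem.Dict.counter words).keys = D := by
    rw [PySem.Dict.keys_counter]; rfl
  have hgetD : (fun w => (PySem.Dict.counter words).getD w 0) = f := by
    funext w
    rw [PySem.Dict.getD_counter]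
  rw [hvals, hitems, hkeys, hgetD, min?_map_key]
  have hDne : D ≠ [] := by
    intro hnil
    cases hww : words with
    | nil => exact hpre hww
    | cons a t =>
      have ha : a ∈ D := (PySem.List.mem_dedup words a).2 (by rw [hww]; simp)
      rw [hnil] at ha
      simp at ha
  obtain ⟨m', hm'⟩ : ∃ m', PySem.List.min? D f = some m' := by
    cases hmm : PySem.List.min? D f with
    | none => exact absurd ((PySem.List.min?_eq_none_iff D f).1 hmm) hDne
    | some m' => exact ⟨m', rfl⟩
  rw [hm']
  simp only [Option.map_some]
  have hfil : ((D.map (fun k => (k, f k))).filter (fun kv => kv.2 == f m')).map (·.1)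
      = D.filter (fun k => f k == f m') := by
    rw [List.filter_map, List.map_map]
    simp [Function.comp_def]
  rw [hfil, PySem.List.pyGet?_zero, PySem.List.pyGet?_zero,
    ← List.head?_eq_getElem?, ← List.head?_eq_getElem?,
    head_filter_eq_min? D f m' hm', head_sorted_eq_min? D f, hm']

-- ===== VERDICT (by name: the statement is the Claim_ definition above) =====
theorem find_rarest_word_spec : Claim_equal_find_rarest_word := by
  intro text _ hpre
  exact main_eq text hpre
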